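-- pv_equiv track=rewrite | github.com/skypank-coder/openenv_regaudit | inference_runtime.py | choose_rule_for_file
-- ===== SOURCE A (Python) =====
-- def choose_rule_for_file(file_name: str | None, rules: list[str]) -> str:
--     if not rules:
--         return "GENERIC-RULE"
--     if not file_name:
--         return rules[0]
--
--     lowered = file_name.lower()
--
--     if "routes" in lowered or "views" in lowered:
--         return next((r for r in rules if "GDPR" in r), rules[0])
--
--     if "middleware" in lowered:
--         return next((r for r in rules if "GDPR" in r), rules[0])
--
--     if "models" in lowered:
--         return next((r for r in rules if "A02" in r or "AUTH" in r), rules[0])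
--
--     if "settings" in lowered:
--         return next((r for r in rules if "CONFIG" in r or "DEBUG" in r), rules[0])
--
--     if "payment" in lowered:
--         return next((r for r in rules if "A03" in r), rules[0])
--
--     if "auth" in lowered:
--         return next((r for r in rules if "A02" in r), rules[0])
--
--     return rules[0]
-- ===== SOURCE B (Python) =====
-- _MARKERS = ("GDPR", "A02", "AUTH", "CONFIG", "DEBUG", "A03")
--
-- _CATEGORIES = [
--     (("routes", "views"), ("GDPR",)),
--     (("middleware",), ("GDPR",)),
--     (("models",), ("A02", "AUTH")),
--     (("settings",), ("CONFIG", "DEBUG")),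
--     (("payment",), ("A03",)),
--     (("auth",), ("A02",)),
-- ]
--
--
-- def choose_rule_for_file(file_name, rules):
--     if not rules:
--         return "GENERIC-RULE"
--     if not file_name:
--         return rules[0]
--     lowered = file_name.lower()
--     # inverted index built once: marker -> index of the first rule containing it
--     first = {}
--     for i, r in enumerate(rules):
--         for m in _MARKERS:
--             if m in r:
--                 first.setdefault(m, i)
--     for keywords, markers in _CATEGORIES:
--         if any(k in lowered for k in keywords):
--             hits = [first[m] for m in markers if m in first]
--             return rules[min(hits)] if hits else rules[0]
--     return rules[0]
-- ===== Notes on version B (the rewrite author's own statement) =====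
-- stated objective: alternative
-- what changed: B builds an inverted index (marker -> index of first rule containing it) in a single pass over the rules, then maps the filename's category to its marker set and returns the rule at the minimum indexed hit, instead of A's per-branch generator scans over the rules.
import Mathlib
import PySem

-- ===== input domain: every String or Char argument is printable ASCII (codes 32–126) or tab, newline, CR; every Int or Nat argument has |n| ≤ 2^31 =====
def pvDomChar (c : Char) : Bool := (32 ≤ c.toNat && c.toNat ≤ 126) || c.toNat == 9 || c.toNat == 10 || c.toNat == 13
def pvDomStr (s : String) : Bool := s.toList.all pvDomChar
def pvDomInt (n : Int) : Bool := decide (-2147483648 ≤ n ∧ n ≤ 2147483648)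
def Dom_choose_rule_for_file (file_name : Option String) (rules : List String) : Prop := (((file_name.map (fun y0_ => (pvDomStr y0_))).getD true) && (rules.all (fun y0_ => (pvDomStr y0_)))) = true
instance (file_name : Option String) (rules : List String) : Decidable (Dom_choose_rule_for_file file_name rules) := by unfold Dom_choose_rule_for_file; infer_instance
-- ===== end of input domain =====

-- B replaces A's per-branch generator scans by an inverted index (marker -> first rule index) built once,
-- resolving a category to the minimum indexed hit (alternative decomposition, same cost).

-- ===== PORT A =====
def choose_rule_for_file (file_name : Option String) (rules : List String) : String :=
  match rules with
  | [] => "GENERIC-RULE"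
  | r0 :: _ =>
    match file_name with
    | none => r0
    | some fn =>
      if fn = "" then r0 else
      let lowered := PySem.Str.lower fn
      if PySem.Str.isIn "routes" lowered || PySem.Str.isIn "views" lowered then
        (rules.find? (fun r => PySem.Str.isIn "GDPR" r)).getD r0
      else if PySem.Str.isIn "middleware" lowered then
        (rules.find? (fun r => PySem.Str.isIn "GDPR" r)).getD r0
      else if PySem.Str.isIn "models" lowered then
        (rules.find? (fun r => PySem.Str.isIn "A02" r || PySem.Str.isIn "AUTH" r)).getD r0
      else if PySem.Str.isIn "settings" lowered then
        (rules.find? (fun r => PySem.Str.isIn "CONFIG" r || PySem.Str.isIn "DEBUG" r)).getD r0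
      else if PySem.Str.isIn "payment" lowered then
        (rules.find? (fun r => PySem.Str.isIn "A03" r)).getD r0
      else if PySem.Str.isIn "auth" lowered then
        (rules.find? (fun r => PySem.Str.isIn "A02" r)).getD r0
      else r0

-- ===== PORT B =====
def pvMarkers : List String := ["GDPR", "A02", "AUTH", "CONFIG", "DEBUG", "A03"]

def pvCategories : List (List String × List String) :=
  [ (["routes", "views"], ["GDPR"]),
    (["middleware"], ["GDPR"]),
    (["models"], ["A02", "AUTH"]),
    (["settings"], ["CONFIG", "DEBUG"]),
    (["payment"], ["A03"]),
    (["auth"], ["A02"]) ]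

-- inverted index: marker -> index of the first rule containing it (Source B's setdefault loop)
def pvBuildIndex (rules : List String) : PySem.Dict String Int :=
  (PySem.List.enumerate rules 0).foldl
    (fun d p => pvMarkers.foldl
      (fun d m => if PySem.Str.isIn m p.2 then d.setdefault m p.1 else d) d)
    PySem.Dict.empty

-- Source B: hits = [first[m] for m in markers if m in first]; rules[min(hits)] if hits else rules[0]
-- (the selected index is always in range, so rules[min(hits)] is exactly (pyGet? …).getD)
def pvSelect (rules : List String) (r0 : String) (markers : List String)
    (first : PySem.Dict String Int) : String :=
  match markers.filterMap (fun m => first.get? m) with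
  | [] => r0
  | h :: t => (PySem.List.pyGet? rules (t.foldl min h)).getD r0

def choose_rule_for_file_alt (file_name : Option String) (rules : List String) : String :=
  match rules with
  | [] => "GENERIC-RULE"
  | r0 :: _ =>
    match file_name with
    | none => r0
    | some fn =>
      if fn = "" then r0 else
      let lowered := PySem.Str.lower fn
      let first := pvBuildIndex rules
      match pvCategories.find? (fun e => e.1.any (fun k => PySem.Str.isIn k lowered)) with
      | some e => pvSelect rules r0 e.2 first
      | none => r0

-- ===== PRECONDITION & SPEC =====
def Spec_choose_rule_for_file (file_name : Option String) (rules : List String) (out : String) : Prop := out = choose_rule_for_file_alt file_name rules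
instance (file_name : Option String) (rules : List String) (out : String) : Decidable (Spec_choose_rule_for_file file_name rules out) := by unfold Spec_choose_rule_for_file; infer_instance

-- ===== CLAIM (what is proved, stated in full; the proofs are below) =====
def Claim_equal_choose_rule_for_file : Prop := ∀ (file_name : Option String) (rules : List String), Dom_choose_rule_for_file file_name rules → Spec_choose_rule_for_file file_name rules (choose_rule_for_file file_name rules)

-- ===== LEMMAS AND PROOFS =====

-- get? after one rule's marker pass (generic marker list, by induction)
lemma pv_inner_get? (r : String) (i : Int) (m : String) :
    ∀ (ms : List String) (d : PySem.Dict String Int),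
      ((ms.foldl (fun d m' => if PySem.Str.isIn m' r then d.setdefault m' i else d) d).get? m)
        = if m ∈ ms ∧ PySem.Str.isIn m r = true ∧ d.get? m = none then some i else d.get? m := by
  intro ms
  induction ms with
  | nil => intro d; simp
  | cons m' rest ih =>
    intro d
    simp only [List.foldl_cons]
    rw [ih]
    have hstep : ((if PySem.Str.isIn m' r then d.setdefault m' i else d).get? m)
        = if m = m' ∧ PySem.Str.isIn m r = true ∧ d.get? m = none then some i else d.get? m := by
      by_cases hmm : m = m'
      · subst hmm
        by_cases hin : PySem.Str.isIn m r = true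
        · simp only [hin, if_pos]
          rw [PySem.Dict.get?_setdefault_self]
          cases hd : d.get? m <;> simp [hd]
        · simp only [Bool.not_eq_true] at hin
          simp only [hin]
          simp
      · by_cases hin' : PySem.Str.isIn m' r = true
        · simp only [hin', if_pos]
          by_cases hc : d.contains m' = true
          · rw [PySem.Dict.setdefault_of_contains d i hc]
            simp [hmm]
          · rw [PySem.Dict.setdefault_of_not_contains d i (by simpa using hc)]
            rw [PySem.Dict.get?_insert_of_ne (hne := hmm)]
            simp [hmm]
        · simp only [Bool.not_eq_true] at hin'
          simp only [hin']
          simp [hmm]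
    rw [hstep]
    by_cases hmem : m ∈ rest <;> by_cases hin : PySem.Str.isIn m r = true <;>
      by_cases hmm : m = m' <;> cases hd : d.get? m <;> simp_all

-- get? of the full index build, with a generalized start offset and accumulator
lemma pv_build_get?_aux (m : String) (hm : m ∈ pvMarkers) :
    ∀ (rules : List String) (s : Int) (d : PySem.Dict String Int),
      (((PySem.List.enumerate rules s).foldl
          (fun d p => pvMarkers.foldl
            (fun d m' => if PySem.Str.isIn m' p.2 then d.setdefault m' p.1 else d) d) d).get? m)
        = match d.get? m with
          | some v => some v
          | none => (rules.findIdx? (fun r => PySem.Str.isIn m r)).map (fun i => (i : Int) + s) := by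
  intro rules
  induction rules with
  | nil => intro s d; cases hd : d.get? m <;> simp [PySem.List.enumerate_nil, hd]
  | cons r rest ih =>
    intro s d
    rw [PySem.List.enumerate_cons, List.foldl_cons, ih]
    rw [pv_inner_get? r s m pvMarkers d]
    by_cases hin : PySem.Str.isIn m r = true
    · cases hd : d.get? m
      · simp only [hm, hin, hd, and_self, if_pos, true_and]
        have hin2 : PySem.Chars.isIn m.toList r.toList = true := by
          simpa [PySem.Str.isIn] using hin
        simp [List.findIdx?_cons, hin2]
      · simp [hd, List.findIdx?_cons, hin]
    · simp only [Bool.not_eq_true] at hin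
      simp only [hin, Bool.false_eq_true, false_and, and_false, if_neg, not_false_iff]
      cases hd : d.get? m
      · simp only [hd]
        rw [List.findIdx?_cons]
        simp only [hin, Bool.false_eq_true, if_neg, not_false_iff]
        cases hf : rest.findIdx? (fun r => PySem.Str.isIn m r) <;> simp [hf]
        push_cast; ring
      · simp [hd]

lemma pv_build_get? (m : String) (hm : m ∈ pvMarkers) (rules : List String) :
    (pvBuildIndex rules).get? m
      = (rules.findIdx? (fun r => PySem.Str.isIn m r)).map (fun i => (i : Int)) := by
  unfold pvBuildIndex
  rw [pv_build_get?_aux m hm rules 0 PySem.Dict.empty]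
  simp

-- selecting by found index equals Python's next(...) scan
lemma pv_find_getD_eq (p : String → Bool) :
    ∀ (rules : List String) (r0 : String),
      (match rules.findIdx? p with
       | none => r0
       | some i => (PySem.List.pyGet? rules (i : Int)).getD r0)
        = (rules.find? p).getD r0 := by
  intro rules
  induction rules with
  | nil => intro r0; simp
  | cons a l ih =>
    intro r0
    rw [List.findIdx?_cons]
    by_cases ha : p a = true
    · simp [ha, PySem.List.pyGet?_natCast]
    · simp only [Bool.not_eq_true] at ha
      simp only [ha, Bool.false_eq_true, if_neg, not_false_iff, List.find?_cons, ha]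
      rw [← ih r0]
      cases hf : l.findIdx? p <;> simp [hf, PySem.List.pyGet?_natCast]

lemma pv_find_getD_eq2 (p q : String → Bool) :
    ∀ (rules : List String) (r0 : String),
      (match rules.findIdx? p, rules.findIdx? q with
       | none, none => r0
       | some i, none => (PySem.List.pyGet? rules (i : Int)).getD r0
       | none, some j => (PySem.List.pyGet? rules (j : Int)).getD r0
       | some i, some j => (PySem.List.pyGet? rules ((min i j : Nat) : Int)).getD r0)
        = (rules.find? (fun r => p r || q r)).getD r0 := by
  intro rules
  induction rules with
  | nil => intro r0; simp
  | cons a l ih =>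
    intro r0
    rw [List.findIdx?_cons, List.findIdx?_cons]
    by_cases hp : p a = true
    · simp only [hp, if_pos]
      by_cases hq : q a = true
      · simp [hq, PySem.List.pyGet?_natCast]
      · simp only [Bool.not_eq_true] at hq
        simp only [hq, Bool.false_eq_true, if_neg, not_false_iff]
        cases hf : l.findIdx? q <;> simp [hp, PySem.List.pyGet?_natCast]
    · simp only [Bool.not_eq_true] at hp
      simp only [hp, Bool.false_eq_true, if_neg, not_false_iff]
      by_cases hq : q a = true
      · simp only [hq, if_pos]
        cases hf : l.findIdx? p <;> simp [hq, PySem.List.pyGet?_natCast, min_zero]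
      · simp only [Bool.not_eq_true] at hq
        simp only [hq, Bool.false_eq_true, if_neg, not_false_iff]
        simp only [List.find?_cons, hp, hq, Bool.false_or]
        rw [← ih r0]
        cases hf : l.findIdx? p <;> cases hg : l.findIdx? q <;>
          simp [PySem.List.pyGet?_natCast, Nat.min_def] <;> split_ifs <;>
          simp [PySem.List.pyGet?_natCast] <;> omega

lemma pv_select_one (rules : List String) (r0 m : String) (hm : m ∈ pvMarkers) :
    pvSelect rules r0 [m] (pvBuildIndex rules)
      = (rules.find? (fun r => PySem.Str.isIn m r)).getD r0 := by
  unfold pvSelect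
  rw [← pv_find_getD_eq (fun r => PySem.Str.isIn m r) rules r0]
  simp only [List.filterMap, pv_build_get? m hm rules]
  cases hf : rules.findIdx? (fun r => PySem.Str.isIn m r) <;> simp [hf]

lemma pv_select_two (rules : List String) (r0 m1 m2 : String)
    (h1 : m1 ∈ pvMarkers) (h2 : m2 ∈ pvMarkers) :
    pvSelect rules r0 [m1, m2] (pvBuildIndex rules)
      = (rules.find? (fun r => PySem.Str.isIn m1 r || PySem.Str.isIn m2 r)).getD r0 := by
  unfold pvSelect
  rw [← pv_find_getD_eq2 (fun r => PySem.Str.isIn m1 r) (fun r => PySem.Str.isIn m2 r) rules r0]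
  simp only [List.filterMap, pv_build_get? m1 h1 rules, pv_build_get? m2 h2 rules]
  cases hf : rules.findIdx? (fun r => PySem.Str.isIn m1 r) <;>
    cases hg : rules.findIdx? (fun r => PySem.Str.isIn m2 r) <;>
      simp [hf, hg, Nat.cast_min]


-- the category dispatch evaluated as A's if-chain
lemma pv_cat_eval (lowered : String) :
    pvCategories.find? (fun e => e.1.any (fun k => PySem.Str.isIn k lowered))
      = (if PySem.Str.isIn "routes" lowered || PySem.Str.isIn "views" lowered then
           some (["routes", "views"], ["GDPR"])
         else if PySem.Str.isIn "middleware" lowered then some (["middleware"], ["GDPR"])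
         else if PySem.Str.isIn "models" lowered then some (["models"], ["A02", "AUTH"])
         else if PySem.Str.isIn "settings" lowered then some (["settings"], ["CONFIG", "DEBUG"])
         else if PySem.Str.isIn "payment" lowered then some (["payment"], ["A03"])
         else if PySem.Str.isIn "auth" lowered then some (["auth"], ["A02"])
         else none) := by
  rcases h1 : PySem.Str.isIn "routes" lowered <;>
  rcases h2 : PySem.Str.isIn "views" lowered <;>
  rcases h3 : PySem.Str.isIn "middleware" lowered <;>
  rcases h4 : PySem.Str.isIn "models" lowered <;>
  rcases h5 : PySem.Str.isIn "settings" lowered <;>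
  rcases h6 : PySem.Str.isIn "payment" lowered <;>
  rcases h7 : PySem.Str.isIn "auth" lowered <;>
  simp only [pvCategories, List.find?, List.any_cons, List.any_nil, Bool.or_false,
    Bool.false_or, h1, h2, h3, h4, h5, h6, h7, Bool.true_or, Bool.or_true, Bool.or_self,
    if_true, if_false, Bool.false_eq_true, Bool.true_eq_false, ite_true, ite_false]

-- ===== VERDICT (by name: the statement is the Claim_ definition above) =====
theorem choose_rule_for_file_spec : Claim_equal_choose_rule_for_file := by
  intro file_name rules _
  unfold Spec_choose_rule_for_file choose_rule_for_file choose_rule_for_file_alt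
  cases rules with
  | nil => rfl
  | cons r0 rest =>
    cases file_name with
    | none => rfl
    | some fn =>
      by_cases h : fn = ""
      · simp [h]
      · simp only [if_neg h, pv_cat_eval]
        split_ifs with h1 h2 h3 h4 h5 h6
        · exact (pv_select_one (r0 :: rest) r0 "GDPR" (by simp [pvMarkers])).symm
        · exact (pv_select_one (r0 :: rest) r0 "GDPR" (by simp [pvMarkers])).symm
        · exact (pv_select_two (r0 :: rest) r0 "A02" "AUTH" (by simp [pvMarkers]) (by simp [pvMarkers])).symm
        · exact (pv_select_two (r0 :: rest) r0 "CONFIG" "DEBUG" (by simp [pvMarkers]) (by simp [pvMarkers])).symm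
        · exact (pv_select_one (r0 :: rest) r0 "A03" (by simp [pvMarkers])).symm
        · exact (pv_select_one (r0 :: rest) r0 "A02" (by simp [pvMarkers])).symm
        · rfl
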